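-- pv_equiv track=rewrite | github.com/737675/github_repo | text_analysis.py | build_prefix_map
-- ===== SOURCE A (Python) =====
-- from collections import Counter, defaultdict
--
-- def build_prefix_map(frequencies):
--     prefix_map = defaultdict(list)
--     for word, freq in frequencies.items():
--         for i in range(1, len(word)+1):
--             prefix_map[word[:i]].append((word, freq))
--     for prefix in prefix_map:
--         prefix_map[prefix].sort(key=lambda x: (-x[1], x[0]))
--     return prefix_map
-- ===== SOURCE B (Python) =====
-- def build_prefix_map(frequencies):
--     prefix_map = {}
--     for word in frequencies:
--         for i in range(1, len(word) + 1):
--             prefix_map[word[:i]] = []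
--     for word, freq in sorted(frequencies.items(), key=lambda x: (-x[1], x[0])):
--         for i in range(1, len(word) + 1):
--             prefix_map[word[:i]].append((word, freq))
--     return prefix_map
-- ===== Notes on version B (the rewrite author's own statement) =====
-- stated objective: faster
-- what changed: Instead of sorting every prefix bucket separately, B sorts the items once globally by (-freq, word) and appends them to the buckets in that order (after a first pass that registers the prefixes in A's key order), so each bucket is built already sorted.
import Mathlib
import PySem

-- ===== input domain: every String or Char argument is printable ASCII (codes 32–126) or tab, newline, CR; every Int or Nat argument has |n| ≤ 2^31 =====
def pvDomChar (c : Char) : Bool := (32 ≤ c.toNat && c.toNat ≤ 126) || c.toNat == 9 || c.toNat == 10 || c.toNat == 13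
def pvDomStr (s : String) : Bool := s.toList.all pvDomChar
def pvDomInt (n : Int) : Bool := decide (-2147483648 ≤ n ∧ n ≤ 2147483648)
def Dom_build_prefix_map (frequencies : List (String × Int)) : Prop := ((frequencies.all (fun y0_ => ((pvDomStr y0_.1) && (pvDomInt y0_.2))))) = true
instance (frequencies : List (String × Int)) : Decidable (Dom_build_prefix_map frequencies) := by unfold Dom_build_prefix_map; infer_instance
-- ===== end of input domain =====

-- B replaces A's per-prefix bucket sorts by ONE global sort of the items by (-freq, word),
-- appending into the buckets in that order so every bucket comes out pre-sorted (objective: faster).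

-- ===== PORT A =====
-- A's dict is a defaultdict(list): 'prefix_map[p].append(x)' is 'modify p [] (· ++ [x])'.
def build_prefix_map (frequencies : List (String × Int)) : List (String × List (String × Int)) :=
  let pm : PySem.Dict String (List (String × Int)) :=
    frequencies.foldl (fun pm wf =>
      (PySem.List.pyRange 1 (PySem.Str.len wf.1 + 1)).foldl
        (fun pm i => pm.modify (PySem.Str.slice wf.1 none (some i)) [] (· ++ [wf])) pm)
      PySem.Dict.empty
  -- 'for prefix in prefix_map: prefix_map[prefix].sort(key=lambda x: (-x[1], x[0]))'
  let pm2 := pm.keys.foldl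
    (fun d p => d.modify p [] (fun v => PySem.List.sorted2 v (fun x => -x.2) (fun x => x.1))) pm
  pm2.items

-- ===== PORT B =====
-- phase 1 registers every prefix (in A's key order) with an empty bucket; phase 2 walks the
-- globally sorted items and appends ('prefix_map[p].append(x)' on an existing key = modify p [] (· ++ [x])).
def build_prefix_map_alt (frequencies : List (String × Int)) : List (String × List (String × Int)) :=
  let pm : PySem.Dict String (List (String × Int)) :=
    frequencies.foldl (fun pm wf =>
      (PySem.List.pyRange 1 (PySem.Str.len wf.1 + 1)).foldl
        (fun pm i => pm.insert (PySem.Str.slice wf.1 none (some i)) []) pm)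
      PySem.Dict.empty
  let pm2 := (PySem.List.sorted2 frequencies (fun x => -x.2) (fun x => x.1)).foldl
    (fun pm wf =>
      (PySem.List.pyRange 1 (PySem.Str.len wf.1 + 1)).foldl
        (fun pm i => pm.modify (PySem.Str.slice wf.1 none (some i)) [] (· ++ [wf])) pm)
    pm
  pm2.items

-- ===== PRECONDITION & SPEC =====
def Spec_build_prefix_map (frequencies : List (String × Int)) (out : List (String × List (String × Int))) : Prop := out = build_prefix_map_alt frequencies
instance (frequencies : List (String × Int)) (out : List (String × List (String × Int))) : Decidable (Spec_build_prefix_map frequencies out) := by unfold Spec_build_prefix_map; infer_instance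

-- ===== CLAIM (what is proved, stated in full; the proofs are below) =====
def Claim_equal_build_prefix_map : Prop := ∀ (frequencies : List (String × Int)), Dom_build_prefix_map frequencies → Spec_build_prefix_map frequencies (build_prefix_map frequencies)

-- ===== LEMMAS AND PROOFS =====

-- proof-only abbreviations
def pyPrefixes (w : String) : List String :=
  (PySem.List.pyRange 1 (PySem.Str.len w + 1)).map (fun i => PySem.Str.slice w none (some i))

def tagPrefixes (wf : String × Int) : List (String × (String × Int)) :=
  (pyPrefixes wf.1).map (fun p => (p, wf))

def prefixPairs (l : List (String × Int)) : List (String × (String × Int)) :=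
  l.flatMap tagPrefixes

def lexKey (x : String × Int) : Lex (Int × String) := toLex (-x.2, x.1)

def bucketOf (l : List (String × Int)) (k : String) : List (String × Int) :=
  ((prefixPairs l).filter (fun q => q.1 == k)).map (fun q => q.2)

def sortKeyed (l : List (String × Int)) : List (String × Int) :=
  PySem.List.sorted2 l (fun x => -x.2) (fun x => x.1)

theorem foldl_nested_eq {ν : Type}
    (g : PySem.Dict String ν → String → (String × Int) → PySem.Dict String ν)
    (l : List (String × Int)) (d : PySem.Dict String ν) :
    l.foldl (fun pm wf =>
      (PySem.List.pyRange 1 (PySem.Str.len wf.1 + 1)).foldl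
        (fun pm i => g pm (PySem.Str.slice wf.1 none (some i)) wf) pm) d
    = (prefixPairs l).foldl (fun pm q => g pm q.1 q.2) d := by
  simp [prefixPairs, tagPrefixes, pyPrefixes, List.foldl_flatMap, List.foldl_map]

theorem lexKey_injective : Function.Injective lexKey := by
  rintro ⟨a1, a2⟩ ⟨b1, b2⟩ h
  simp only [lexKey, toLex_inj, Prod.mk.injEq] at h
  simp [h.2, (by omega : a2 = b2)]

theorem getD_foldl_insert_nil (l : List (String × (String × Int)))
    (d : PySem.Dict String (List (String × Int)))
    (h : ∀ k, d.getD k [] = []) (k : String) :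
    (l.foldl (fun pm q => pm.insert q.1 ([] : List (String × Int))) d).getD k [] = [] := by
  induction l generalizing d with
  | nil => exact h k
  | cons q l ih =>
      refine ih _ (fun k' => ?_)
      rw [PySem.Dict.getD_insert]
      split <;> simp [h]

theorem set_update_absorb (s : PySem.Set String) (xs : List String)
    (h : ∀ x ∈ xs, x ∈ s) : PySem.Set.update s xs = s := by
  rw [PySem.Set.update_eq_append_filter]
  simpa using h

theorem prefixPairs_perm {l l' : List (String × Int)} (h : l.Perm l') :
    (prefixPairs l).Perm (prefixPairs l') :=
  h.flatMap (fun _ _ => List.Perm.refl _)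

theorem sorted2_eq_insertBy (l : List (String × Int)) :
    sortKeyed l = l.foldl (fun acc x => PySem.List.insertBy (fun a b => decide (lexKey a < lexKey b)) x acc) [] := by
  have hb : (fun (a b : String × Int) =>
      (decide ((fun x : String × Int => -x.2) a < (fun x : String × Int => -x.2) b) ||
        (!decide ((fun x : String × Int => -x.2) b < (fun x : String × Int => -x.2) a) &&
          decide ((fun x : String × Int => x.1) a < (fun x : String × Int => x.1) b))))
      = fun a b => decide (lexKey a < lexKey b) := by
    funext a b
    simp only [lexKey, Prod.Lex.lt_iff, ofLex_toLex]
    rcases lt_trichotomy (-a.2 : Int) (-b.2) with h | h | h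
    · simp [h]
    · simp [h]
    · simp [not_lt.mpr h.le, h.ne', h]
  simp only [sortKeyed, PySem.List.sorted2, Bool.false_eq_true, if_false]
  rw [hb]

theorem sortKeyed_pairwise (l : List (String × Int)) :
    (sortKeyed l).Pairwise (fun a b => lexKey a ≤ lexKey b) := by
  rw [sorted2_eq_insertBy]
  suffices h : ∀ acc : List (String × Int), acc.Pairwise (fun a b => lexKey a ≤ lexKey b) →
      (l.foldl (fun acc x => PySem.List.insertBy (fun a b => decide (lexKey a < lexKey b)) x acc) acc).Pairwise
        (fun a b => lexKey a ≤ lexKey b) from h [] (by simp)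
  induction l with
  | nil => exact fun acc h => h
  | cons x l ih => exact fun acc h => ih _ (PySem.List.insertBy_pairwise_le lexKey x acc h)

theorem nodup_pyPrefixes (w : String) : (pyPrefixes w).Nodup := by
  refine (PySem.List.nodup_pyRange_one 1 (PySem.Str.len w + 1)).map_on ?_
  intro i hi j hj hij
  rw [PySem.List.mem_pyRange_one] at hi hj
  rw [PySem.Str.len_eq] at hi hj
  have hi' : i = (i.toNat : Int) := by omega
  have hj' : j = (j.toNat : Int) := by omega
  have : (PySem.Str.slice w none (some i)).toList = (PySem.Str.slice w none (some j)).toList := by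
    rw [hij]
  rw [PySem.Str.slice, PySem.Str.slice] at this
  simp only [String.toList_ofList] at this
  rw [PySem.Chars.slice_eq_listSlice, PySem.Chars.slice_eq_listSlice, hi', hj', PySem.List.slice_to_natCast, PySem.List.slice_to_natCast] at this
  have hlen := congrArg List.length this
  simp only [List.length_take] at hlen
  omega

theorem filter_beq_of_nodup (l : List String) (hl : l.Nodup) (k : String) :
    l.filter (fun p => p == k) = if k ∈ l then [k] else [] := by
  induction l with
  | nil => simp
  | cons x l ih =>
      rcases List.nodup_cons.mp hl with ⟨hx, hl'⟩
      by_cases hxk : x = k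
      · subst hxk
        simp [ih hl', hx]
      · simp [hxk, ih hl', Ne.symm hxk]

theorem bucketOf_eq_filter (l : List (String × Int)) (k : String) :
    bucketOf l k = l.filter (fun wf => decide (k ∈ pyPrefixes wf.1)) := by
  induction l with
  | nil => simp [bucketOf, prefixPairs]
  | cons x l ih =>
      have hsplit : bucketOf (x :: l) k
          = ((tagPrefixes x).filter (fun q => q.1 == k)).map (fun q => q.2) ++ bucketOf l k := by
        simp only [bucketOf, prefixPairs, List.flatMap_cons, List.filter_append, List.map_append]
      rw [hsplit, ih]
      have hhead : ((tagPrefixes x).filter (fun q => q.1 == k)).map (fun q => q.2)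
          = if k ∈ pyPrefixes x.1 then [x] else [] := by
        rw [tagPrefixes, List.filter_map]
        have : ((fun q : String × (String × Int) => q.1 == k) ∘ fun p => (p, x)) = fun p => p == k := rfl
        rw [this, filter_beq_of_nodup _ (nodup_pyPrefixes x.1) k]
        split <;> simp
      rw [hhead, List.filter_cons]
      by_cases hk : k ∈ pyPrefixes x.1 <;> simp [hk]

theorem getD_foldl_modify_list (f : List (String × Int) → List (String × Int))
    (l : List String) (hl : l.Nodup) (d : PySem.Dict String (List (String × Int))) (k : String) :
    (l.foldl (fun d' p => d'.modify p [] f) d).getD k []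
      = if k ∈ l then f (d.getD k []) else d.getD k [] := by
  induction l generalizing d with
  | nil => simp
  | cons p l ih =>
      rcases List.nodup_cons.mp hl with ⟨hp, hl'⟩
      rw [List.foldl_cons, ih hl', PySem.Dict.getD_modify]
      by_cases hkp : k = p
      · subst hkp
        simp [hp]
      · simp [hkp, List.mem_cons]

theorem bucket_sorted_eq (l : List (String × Int)) (k : String) :
    sortKeyed (bucketOf l k) = bucketOf (sortKeyed l) k := by
  refine PySem.List.eq_of_perm_of_pairwise_le_of_injective lexKey lexKey_injective ?_ ?_ ?_
  · refine (PySem.List.sorted2_perm _ _ _ _).trans ?_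
    refine List.Perm.map _ (List.Perm.filter _ ?_)
    exact prefixPairs_perm (PySem.List.sorted2_perm _ _ _ _).symm
  · exact sortKeyed_pairwise _
  · rw [bucketOf_eq_filter]
    exact (sortKeyed_pairwise l).sublist List.filter_sublist


theorem build_prefix_map_eq (l : List (String × Int)) :
    build_prefix_map l
      = (PySem.Set.ofList ((prefixPairs l).map (fun q => q.1))).map
          (fun k => (k, sortKeyed (bucketOf l k))) := by
  have hpm : l.foldl (fun pm wf =>
      (PySem.List.pyRange 1 (PySem.Str.len wf.1 + 1)).foldl
        (fun pm i => pm.modify (PySem.Str.slice wf.1 none (some i)) ([] : List (String × Int)) (· ++ [wf])) pm)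
      PySem.Dict.empty
      = (prefixPairs l).foldl (fun pm q => pm.modify q.1 [] (· ++ [q.2])) PySem.Dict.empty :=
    foldl_nested_eq (fun pm p wf => pm.modify p [] (· ++ [wf])) l PySem.Dict.empty
  set P := (prefixPairs l).foldl (fun pm q => pm.modify q.1 [] (· ++ [q.2])) PySem.Dict.empty with hP
  have hkeys : P.keys = PySem.Set.ofList ((prefixPairs l).map (fun q => q.1)) := by
    rw [hP, PySem.Dict.keys_foldl_modify_key (prefixPairs l) (fun q => q.1) []
      (fun _ q v => v ++ [q.2]) PySem.Dict.empty, PySem.Dict.keys_empty, PySem.Set.update_nil_left]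
  have hnodup : P.keys.Nodup := by
    rw [hP]
    exact PySem.Dict.nodup_keys_foldl_modify_key _ _ _ _ _ PySem.Dict.nodup_keys_empty
  have hget : ∀ k, P.getD k [] = bucketOf l k := by
    intro k
    rw [hP, PySem.Dict.getD_foldl_modify_append, PySem.Dict.getD_empty]
    rfl
  have hstep : build_prefix_map l
      = (P.keys.foldl (fun d p => d.modify p []
          (fun v => PySem.List.sorted2 v (fun x => -x.2) (fun x => x.1))) P).items := by
    rw [build_prefix_map]
    rw [hpm]
  set Q := P.keys.foldl (fun d p => d.modify p []
      (fun v => PySem.List.sorted2 v (fun x => -x.2) (fun x => x.1))) P with hQ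
  have hkeysQ : Q.keys = P.keys := by
    rw [hQ, PySem.Dict.keys_foldl_modify_key P.keys (fun p => p) []
      (fun _ _ v => PySem.List.sorted2 v (fun x => -x.2) (fun x => x.1)) P, List.map_id']
    exact set_update_absorb _ _ (fun x hx => hx)
  have hnodupQ : Q.keys.Nodup := hkeysQ ▸ hnodup
  have hgetQ : ∀ k ∈ P.keys, Q.getD k [] = sortKeyed (bucketOf l k) := by
    intro k hk
    rw [hQ, getD_foldl_modify_list _ P.keys hnodup P k, if_pos hk, hget]
    rfl
  rw [hstep, PySem.Dict.items_eq_map_keys Q hnodupQ [], hkeysQ, hkeys]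
  refine List.map_congr_left (fun k hk => ?_)
  rw [hgetQ k (by rwa [hkeys])]


theorem build_prefix_map_alt_eq (l : List (String × Int)) :
    build_prefix_map_alt l
      = (PySem.Set.ofList ((prefixPairs l).map (fun q => q.1))).map
          (fun k => (k, bucketOf (sortKeyed l) k)) := by
  have hpm1 : l.foldl (fun pm wf =>
      (PySem.List.pyRange 1 (PySem.Str.len wf.1 + 1)).foldl
        (fun pm i => pm.insert (PySem.Str.slice wf.1 none (some i)) ([] : List (String × Int))) pm)
      PySem.Dict.empty
      = (prefixPairs l).foldl (fun pm q => pm.insert q.1 []) PySem.Dict.empty :=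
    foldl_nested_eq (fun pm p _ => pm.insert p []) l PySem.Dict.empty
  set P := (prefixPairs l).foldl (fun pm q => pm.insert q.1 ([] : List (String × Int))) PySem.Dict.empty with hP
  have hkeys : P.keys = PySem.Set.ofList ((prefixPairs l).map (fun q => q.1)) := by
    rw [hP, PySem.Dict.keys_foldl_insert_key (prefixPairs l) (fun q => q.1)
      (fun _ _ => []) PySem.Dict.empty, PySem.Dict.keys_empty, PySem.Set.update_nil_left]
  have hnodup : P.keys.Nodup := by
    rw [hP]
    exact PySem.Dict.nodup_keys_foldl_insert_key _ _ _ _ PySem.Dict.nodup_keys_empty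
  have hget : ∀ k, P.getD k [] = [] := by
    intro k
    rw [hP]
    exact getD_foldl_insert_nil _ _ (fun k' => PySem.Dict.getD_empty k' []) k
  have hpm2 : (sortKeyed l).foldl (fun pm wf =>
      (PySem.List.pyRange 1 (PySem.Str.len wf.1 + 1)).foldl
        (fun pm i => pm.modify (PySem.Str.slice wf.1 none (some i)) ([] : List (String × Int)) (· ++ [wf])) pm) P
      = (prefixPairs (sortKeyed l)).foldl (fun pm q => pm.modify q.1 [] (· ++ [q.2])) P :=
    foldl_nested_eq (fun pm p wf => pm.modify p [] (· ++ [wf])) (sortKeyed l) P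
  set Q := (prefixPairs (sortKeyed l)).foldl (fun pm q => pm.modify q.1 [] (· ++ [q.2])) P with hQ
  have hstep : build_prefix_map_alt l = Q.items := by
    rw [build_prefix_map_alt]
    rw [hpm1]
    exact congrArg PySem.Dict.items hpm2
  have hkeysQ : Q.keys = P.keys := by
    rw [hQ, PySem.Dict.keys_foldl_modify_key (prefixPairs (sortKeyed l)) (fun q => q.1) []
      (fun _ q v => v ++ [q.2]) P]
    refine set_update_absorb _ _ (fun x hx => ?_)
    rw [hkeys, PySem.Set.mem_ofList]
    exact (((prefixPairs_perm (PySem.List.sorted2_perm l (fun x => -x.2) (fun x => x.1) false)).map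
      (fun q => q.1)).mem_iff).mp hx
  have hnodupQ : Q.keys.Nodup := by
    rw [hQ]
    exact PySem.Dict.nodup_keys_foldl_modify_key _ _ _ _ _ hnodup
  have hgetQ : ∀ k, Q.getD k [] = bucketOf (sortKeyed l) k := by
    intro k
    rw [hQ, PySem.Dict.getD_foldl_modify_append, hget]
    rfl
  rw [hstep, PySem.Dict.items_eq_map_keys Q hnodupQ [], hkeysQ, hkeys]
  exact List.map_congr_left (fun k _ => by rw [hgetQ])

-- ===== VERDICT (by name: the statement is the Claim_ definition above) =====
theorem build_prefix_map_spec : Claim_equal_build_prefix_map := by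
  intro l _
  show build_prefix_map l = build_prefix_map_alt l
  rw [build_prefix_map_eq, build_prefix_map_alt_eq]
  exact List.map_congr_left (fun k _ => by rw [bucket_sorted_eq])
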